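-- pv_equiv track=rewrite | github.com/ljs65626/Programmers | 프로그래머스/1/250137. ［PCCP 기출문제］ 1번 ／ 붕대 감기/［PCCP 기출문제］ 1번 ／ 붕대 감기.py | solution
-- ===== SOURCE A (Python) =====
-- def solution(bandage, health, attacks):
--     answer = 0
--     current=health
--     leng = len(attacks)
--     for i in range(leng):
--         attack_time1, damage1 = attacks[i]
--
--         if i==0:
--             current-=damage1
--             if current<=0:
--                 answer=-1
--                 return answer
--             continue
--
--         attack_time2, damage2 = attacks[i-1]
--         diff = attack_time1-attack_time2
--         if diff > bandage[0]:
--             current+=((diff*bandage[1])+(bandage[2]*((diff-1)//bandage[0]))-bandage[1])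
--         else:
--             current+=((diff-1)*bandage[1])
--
--         current = min(health, current)
--         current-=damage1
--         if current<=0:
--             answer=-1
--             return answer
--
--     answer=current
--
--
--     return answer
-- ===== SOURCE B (Python) =====
-- def solution(bandage, health, attacks):
--     # prefix-sum + running-minimum formulation: instead of clamping the HP to
--     # health at every gap, keep P = net HP delta so far and M = min over past
--     # attacks j of (health - damage_j - P_j); the HP after attack i is P + M.
--     P, M, prev_t = 0, health, None
--     for t, d in attacks:
--         if prev_t is not None:
--             diff = t - prev_t
--             heal = (diff - 1) * bandage[1]
--             if diff > bandage[0]: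
--                 heal += ((diff - 1) // bandage[0]) * bandage[2]
--             P += heal
--         P -= d
--         q = health - d - P
--         if q < M:
--             M = q
--         if P + M <= 0:
--             return -1
--         prev_t = t
--     return P + M
-- ===== Notes on version B (the rewrite author's own statement) =====
-- stated objective: alternative
-- what changed: B replaces A's stateful simulation (HP clamped to health at every gap, indexed lookback attacks[i-1]) by a single pass over the attacks keeping a prefix sum P of net HP change and a running minimum M of health - damage_j - P_j, so the clamp disappears and the HP after each attack is recovered algebraically as P + M.
-- outside the precondition, e.g. on solution([5, 1, 5], 10, [[1, 2], [2, 100], [3]]): A returns -1, B returns -1; on solution([0, 5, 5], 10, [[1, 9], [1, 5], [5, 1]]): A returns -1, B returns -1; on solution([1, 1], 10, [[1, 2], [1, 100], [4, 1]]): A returns -1, B returns -1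
import Mathlib
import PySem

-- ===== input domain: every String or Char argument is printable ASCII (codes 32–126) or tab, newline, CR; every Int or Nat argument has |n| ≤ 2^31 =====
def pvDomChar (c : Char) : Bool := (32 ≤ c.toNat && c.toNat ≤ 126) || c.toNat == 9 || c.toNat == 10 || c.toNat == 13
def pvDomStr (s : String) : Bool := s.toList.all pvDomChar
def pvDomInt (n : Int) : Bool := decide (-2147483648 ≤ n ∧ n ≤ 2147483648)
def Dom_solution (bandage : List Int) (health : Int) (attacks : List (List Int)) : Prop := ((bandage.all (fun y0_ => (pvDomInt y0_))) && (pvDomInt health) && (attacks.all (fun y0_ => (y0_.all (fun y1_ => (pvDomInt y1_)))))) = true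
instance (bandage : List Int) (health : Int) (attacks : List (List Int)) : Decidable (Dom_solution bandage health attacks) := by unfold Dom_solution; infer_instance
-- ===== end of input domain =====

-- B recasts A's clamped HP simulation as a prefix-sum plus running-minimum pass (alternative algorithm, same O(n)).


-- ===== PORT A =====
-- A's loop 'for i in range(len(attacks))' with early 'return -1'; list/row reads are
-- Python-valid under Pre_solution (getD's default is only reached where Python raises,
-- outside Pre_solution).
def solGoA (bandage : List Int) (health : Int) (attacks : List (List Int)) (i : Nat) (current : Int) : Int :=
  if _h : i < attacks.length then
    let row := attacks.getD i []
    let damage1 := row.getD 1 0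
    if i = 0 then
      let current := current - damage1
      if current ≤ 0 then -1 else solGoA bandage health attacks (i + 1) current
    else
      let diff := row.getD 0 0 - (attacks.getD (i - 1) []).getD 0 0
      let current :=
        if diff > bandage.getD 0 0 then
          current + (diff * bandage.getD 1 0 + bandage.getD 2 0 * PySem.Int.floordiv (diff - 1) (bandage.getD 0 0) - bandage.getD 1 0)
        else
          current + (diff - 1) * bandage.getD 1 0
      let current := min health current
      let current := current - damage1
      if current ≤ 0 then -1 else solGoA bandage health attacks (i + 1) current
  else current
termination_by attacks.length - i

def solution (bandage : List Int) (health : Int) (attacks : List (List Int)) : Int :=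
  solGoA bandage health attacks 0 health

-- ===== PORT B =====
-- B's single pass: P = prefix sum of net HP change, M = running min of health - d - P,
-- prev_t carried as Option (Python's None sentinel).
def solGoB (bandage : List Int) (health : Int) : List (List Int) → Option Int → Int → Int → Int
  | [], _, P, M => P + M
  | row :: rest, prevT, P, M =>
      let t := row.getD 0 0
      let d := row.getD 1 0
      let P1 :=
        match prevT with
        | none => P
        | some pt =>
            let diff := t - pt
            let heal := (diff - 1) * bandage.getD 1 0 +
              (if diff > bandage.getD 0 0 then PySem.Int.floordiv (diff - 1) (bandage.getD 0 0) * bandage.getD 2 0 else 0)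
            P + heal
      let P2 := P1 - d
      let q := health - d - P2
      let M1 := if q < M then q else M
      if P2 + M1 ≤ 0 then -1 else solGoB bandage health rest (some t) P2 M1

def solution_alt (bandage : List Int) (health : Int) (attacks : List (List Int)) : Int :=
  solGoB bandage health attacks none 0 health

-- ===== PRECONDITION & SPEC =====
-- Pre_ excludes the inputs on which the Python A raises: a malformed first row, and —
-- once the loop reaches the gap-healing code (≥ 2 attacks and the first attack survived) —
-- any malformed row, a bandage too short for the branch that runs, or bandage[0] = 0 with a
-- positive time gap (ZeroDivisionError). Because A can die (return -1) at a later attack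
-- before reaching the offending row or gap, this closed form slightly over-excludes some
-- inputs where A returns — see the cited examples, on which A and B agree anyway.
def Pre_solution (bandage : List Int) (health : Int) (attacks : List (List Int)) : Prop :=
  (attacks ≠ [] → (attacks.getD 0 []).length = 2) ∧
  (2 ≤ attacks.length → 0 < health - (attacks.getD 0 []).getD 1 0 →
    ((∀ a ∈ attacks, a.length = 2) ∧
      ((2 ≤ bandage.length ∧
          ∀ p ∈ attacks.zip attacks.tail, p.2.getD 0 0 - p.1.getD 0 0 ≤ bandage.getD 0 0) ∨
       (3 ≤ bandage.length ∧ (bandage.getD 0 0 = 0 →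
          ∀ p ∈ attacks.zip attacks.tail, p.2.getD 0 0 - p.1.getD 0 0 ≤ 0)))))
instance (bandage : List Int) (health : Int) (attacks : List (List Int)) : Decidable (Pre_solution bandage health attacks) := by unfold Pre_solution; infer_instance

def pvWitness_solution : List Int × Int × List (List Int) := ([5, 1, 5], 30, [[2, 10], [9, 15], [10, 5], [11, 5]])

def Spec_solution (bandage : List Int) (health : Int) (attacks : List (List Int)) (out : Int) : Prop := out = solution_alt bandage health attacks
instance (bandage : List Int) (health : Int) (attacks : List (List Int)) (out : Int) : Decidable (Spec_solution bandage health attacks out) := by unfold Spec_solution; infer_instance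

-- ===== CLAIM (what is proved, stated in full; the proofs are below) =====
def Claim_equal_solution : Prop := ∀ (bandage : List Int) (health : Int) (attacks : List (List Int)), Dom_solution bandage health attacks → Pre_solution bandage health attacks → Spec_solution bandage health attacks (solution bandage health attacks)

-- ===== LEMMAS AND PROOFS =====

lemma getD_append_cons {α : Type} [Inhabited α] (pre : List α) (x : α) (rest : List α) :
    (pre ++ x :: rest).getD pre.length default = x := by
  induction pre with
  | nil => rfl
  | cons a pre ih => rw [List.cons_append, List.length_cons, List.getD_cons_succ]; exact ih

-- the loop invariant: A's running HP equals B's P + M, with the processed prefix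
-- 'pre ++ [prow]' and A's index pointing just past prow.
lemma solGo_eq (bandage : List Int) (health : Int) :
    ∀ (rest pre : List (List Int)) (prow : List Int) (P M : Int),
      solGoA bandage health (pre ++ prow :: rest) (pre.length + 1) (P + M) =
      solGoB bandage health rest (some (prow.getD 0 0)) P M := by
  intro rest
  induction rest with
  | nil =>
      intro pre prow P M
      rw [solGoA]
      simp [solGoB]
  | cons row rest ih =>
      intro pre prow P M
      rw [solGoA]
      have hlen : pre.length + 1 < (pre ++ prow :: row :: rest).length := by
        simp
      have hrow : (pre ++ prow :: row :: rest).getD (pre.length + 1) [] = row := by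
        have h2 : pre ++ prow :: row :: rest = (pre ++ [prow]) ++ row :: rest := by simp
        rw [h2]
        have h3 := getD_append_cons (pre ++ [prow]) row rest
        simp only [List.length_append, List.length_cons, List.length_nil] at h3
        exact h3
      have hprev : (pre ++ prow :: row :: rest).getD (pre.length + 1 - 1) [] = prow := by
        simp only [Nat.add_sub_cancel]
        exact getD_append_cons pre prow (row :: rest)
      rw [dif_pos hlen, if_neg (by omega : ¬ pre.length + 1 = 0), hrow, hprev]
      simp only [solGoB]
      set t := row.getD 0 0 with ht
      set d := row.getD 1 0 with hd
      set b0 := bandage.getD 0 0 with hb0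
      set b1 := bandage.getD 1 0 with hb1
      set b2 := bandage.getD 2 0 with hb2
      set diff := t - prow.getD 0 0 with hdiff
      set f := PySem.Int.floordiv (diff - 1) b0 with hf
      have hA : (if diff > b0 then (P + M) + (diff * b1 + b2 * f - b1) else (P + M) + (diff - 1) * b1)
          = (P + M) + ((diff - 1) * b1 + (if diff > b0 then f * b2 else 0)) := by
        split_ifs <;> ring
      have hkey : ∀ heal : Int,
          min health ((P + M) + heal) - d
            = (P + heal - d) + (if health - d - (P + heal - d) < M then health - d - (P + heal - d) else M) := by
        intro heal
        rw [min_def]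
        split_ifs <;> omega
      rw [hA, hkey]
      set heal := (diff - 1) * b1 + (if diff > b0 then f * b2 else 0) with hheal
      set P2 := P + heal - d with hP2
      set q := health - d - P2 with hq
      set M1 := if q < M then q else M with hM1
      split_ifs with hstop
      · rfl
      · have h4 := ih (pre ++ [prow]) row P2 M1
        simpa using h4

-- ===== VERDICT (by name: the statement is the Claim_ definition above) =====
theorem solution_spec : Claim_equal_solution := by
  intro bandage health attacks _ _
  show solution bandage health attacks = solution_alt bandage health attacks
  cases attacks with
  | nil => simp [solution, solution_alt, solGoA, solGoB]
  | cons row rest =>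
      show solGoA bandage health (row :: rest) 0 health = solGoB bandage health (row :: rest) none 0 health
      rw [solGoA]
      simp only [solGoB, List.length_cons, List.getD_cons_zero]
      norm_num
      split_ifs with hstop
      · rfl
      · have h4 := solGo_eq bandage health rest [] row (-(row.getD 1 0)) health
        have h5 : -(row.getD 1 0) + health = health - row.getD 1 0 := by ring
        rw [h5] at h4
        simpa [List.getD] using h4
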